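-- pv_equiv track=rewrite | github.com/ccelest1/InterviewPrep | HRs/challenges/hr_challenges3.py | alternatingCharacters
-- ===== SOURCE A (Python) =====
-- def alternatingCharacters(s: str) -> int:
--     if not s:
--         return 0
--     current_char = s[0]
--     deletions = 0
--     for i in range(1, len(s)):
--         if s[i] == current_char:
--             deletions += 1
--         else:
--             current_char = s[i]
--             continue
--     return deletions
-- ===== SOURCE B (Python) =====
-- from itertools import groupby
--
-- def alternatingCharacters(s: str) -> int:
--     return len(s) - sum(1 for _ in groupby(s))
-- ===== Notes on version B (the rewrite author's own statement) =====
-- stated objective: idiomatic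
-- what changed: Replaces the stateful scan tracking the previous character with itertools.groupby run-collapsing: deletions = len(s) minus the number of maximal runs.
import Mathlib
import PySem

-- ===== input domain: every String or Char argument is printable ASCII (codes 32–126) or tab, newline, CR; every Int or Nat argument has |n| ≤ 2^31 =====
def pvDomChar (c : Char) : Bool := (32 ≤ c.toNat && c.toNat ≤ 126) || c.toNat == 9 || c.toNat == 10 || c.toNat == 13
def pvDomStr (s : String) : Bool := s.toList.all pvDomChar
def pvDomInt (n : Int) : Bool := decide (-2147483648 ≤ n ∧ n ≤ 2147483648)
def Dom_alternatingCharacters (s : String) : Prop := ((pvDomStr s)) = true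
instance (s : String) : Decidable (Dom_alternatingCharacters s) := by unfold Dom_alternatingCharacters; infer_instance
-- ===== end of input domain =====

-- B replaces A's stateful previous-character scan by collapsing the string into maximal runs
-- of equal characters (itertools.groupby) and returning len(s) minus the number of runs (idiomatic).

-- ===== PORT A =====
-- the for-loop over range(1, len(s)) as structural recursion over the tail,
-- carrying the same state (current_char, deletions)
def aLoopA : Char → Int → List Char → Int
  | _, deletions, [] => deletions
  | currentChar, deletions, x :: rest =>
    if x == currentChar then aLoopA currentChar (deletions + 1) rest
    else aLoopA x deletions rest

def alternatingCharacters (s : String) : Int :=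
  match s.toList with
  | [] => 0
  | c :: rest => aLoopA c 0 rest

-- ===== PORT B =====
-- itertools.groupby(s) ported as List.splitBy (· == ·): the list of maximal runs
def alternatingCharacters_alt (s : String) : Int :=
  (s.toList.length : Int) - ((s.toList.splitBy (· == ·)).length : Int)

-- ===== PRECONDITION & SPEC =====
def Spec_alternatingCharacters (s : String) (out : Int) : Prop := out = alternatingCharacters_alt s
instance (s : String) (out : Int) : Decidable (Spec_alternatingCharacters s out) := by unfold Spec_alternatingCharacters; infer_instance

-- ===== CLAIM (what is proved, stated in full; the proofs are below) =====
def Claim_equal_alternatingCharacters : Prop := ∀ (s : String), Dom_alternatingCharacters s → Spec_alternatingCharacters s (alternatingCharacters s)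

-- ===== LEMMAS AND PROOFS =====

-- A's scan plus the number of groups splitBy.loop will produce account exactly for
-- the accumulated deletions, the remaining characters and the groups already closed.
theorem aLoopA_splitBy_loop (xs : List Char) :
    ∀ (c : Char) (d : Int) (r : List Char) (acc : List (List Char)),
      aLoopA c d xs + ((List.splitBy.loop (· == ·) xs c r acc).length : Int)
        = d + xs.length + acc.length + 1 := by
  induction xs with
  | nil =>
    intro c d r acc
    simp [aLoopA, List.splitBy.loop]
    ring
  | cons x t ih =>
    intro c d r acc
    by_cases h : x = c
    · subst h
      simp [aLoopA, List.splitBy.loop, ih]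
      ring
    · have hbc : (c == x) = false := by simp [Ne.symm h]
      have hxc : (x == c) = false := by simp [h]
      simp [aLoopA, List.splitBy.loop, hbc, hxc, ih]
      ring

-- ===== VERDICT (by name: the statement is the Claim_ definition above) =====
theorem alternatingCharacters_spec : Claim_equal_alternatingCharacters := by
  intro s _
  unfold Spec_alternatingCharacters alternatingCharacters alternatingCharacters_alt List.splitBy
  cases s.toList with
  | nil => simp
  | cons c rest =>
    have h := aLoopA_splitBy_loop rest c 0 [] []
    simp at h ⊢
    omega
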